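-- pv_equiv track=rewrite | github.com/Reva-B98/Project-NLTK | Project_NLTK/measured_entity_recognition.py | measured_entity
-- ===== SOURCE A (Python) =====
-- def measured_entity(tokens, unit_gazetteer, date_gazetteer, time_gazetteer):
--         measured_entities = []
--         i = 0
--         while i < len(tokens):
--             token = tokens[i]
--             if token.replace(',', '').replace('.', '').isdigit():
--                 measured_entity_parts = [token]
--                 j = i + 1
--                 while j < len(tokens):
--                     next_token = tokens[j].lower()
--                     if next_token in unit_gazetteer or next_token in {"mln", "billion", "thousand", "million"}:
--                         measured_entity_parts.append(tokens[j])
--                         j += 1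
--                     else:
--                         break
--                 measured_entities.append(' '.join(measured_entity_parts))
--                 i = j - 1
--             elif tokens[i].lower() in date_gazetteer:
--                 measured_entities.append(f"{tokens[i]} (date)")
--             elif tokens[i].lower() in time_gazetteer:
--                 measured_entities.append(f"{tokens[i]} (time)")
--             else:
--                 measured_entities.append(token)
--             i += 1
--         return measured_entities
-- ===== SOURCE B (Python) =====
-- def measured_entity(tokens, unit_gazetteer, date_gazetteer, time_gazetteer):
--     out = []
--     in_run = False
--     extra = {"mln", "billion", "thousand", "million"}
--     for token in tokens:
--         low = token.lower()
--         if in_run and (low in unit_gazetteer or low in extra):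
--             out[-1] = out[-1] + ' ' + token
--         elif token.replace(',', '').replace('.', '').isdigit():
--             out.append(token)
--             in_run = True
--         elif low in date_gazetteer:
--             out.append(token + " (date)")
--             in_run = False
--         elif low in time_gazetteer:
--             out.append(token + " (time)")
--             in_run = False
--         else:
--             out.append(token)
--             in_run = False
--     return out
-- ===== Notes on version B (the rewrite author's own statement) =====
-- stated objective: simpler
-- what changed: Replaced the index-driven outer while with an inner lookahead while and the i = j - 1 jump by a single flat loop over the tokens that carries an in_run flag and appends unit tokens onto the last emitted entity.
import Mathlib
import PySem

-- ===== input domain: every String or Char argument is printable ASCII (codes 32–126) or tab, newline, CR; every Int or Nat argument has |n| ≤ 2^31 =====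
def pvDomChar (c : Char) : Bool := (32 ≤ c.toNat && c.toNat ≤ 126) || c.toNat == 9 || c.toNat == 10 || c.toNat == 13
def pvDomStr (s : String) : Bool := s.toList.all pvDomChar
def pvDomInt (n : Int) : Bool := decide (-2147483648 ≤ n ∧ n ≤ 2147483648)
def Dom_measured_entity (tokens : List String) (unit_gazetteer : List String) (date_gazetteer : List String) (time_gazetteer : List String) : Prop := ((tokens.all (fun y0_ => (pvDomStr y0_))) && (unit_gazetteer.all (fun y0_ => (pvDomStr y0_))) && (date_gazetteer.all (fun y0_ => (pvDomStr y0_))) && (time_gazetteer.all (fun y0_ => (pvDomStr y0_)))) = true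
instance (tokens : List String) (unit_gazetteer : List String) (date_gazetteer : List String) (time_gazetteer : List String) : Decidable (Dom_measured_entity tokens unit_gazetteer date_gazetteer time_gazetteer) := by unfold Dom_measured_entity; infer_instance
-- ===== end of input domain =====

-- B replaces A's index-based outer while + inner lookahead while (with the i = j - 1 jump)
-- by one flat pass carrying an in_run flag that extends the last emitted entity in place.

-- ===== PORT A =====
-- token.lower() in unit_gazetteer or in {"mln","billion","thousand","million"}
def pvIsUnit (unit_gazetteer : List String) (t : String) : Bool :=
  unit_gazetteer.contains (PySem.Str.lower t) ||
    ["mln", "billion", "thousand", "million"].contains (PySem.Str.lower t)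

-- token.replace(',','').replace('.','').isdigit()
def pvIsNum (t : String) : Bool :=
  PySem.Str.strIsdigit (PySem.Str.replace (PySem.Str.replace t "," "") "." "")

-- A's inner while: consume following unit tokens; returns (consumed parts, remaining tokens)
def pvInner (unit_gazetteer : List String) : List String → List String × List String
  | [] => ([], [])
  | t :: rest =>
    if pvIsUnit unit_gazetteer t then
      let pr := pvInner unit_gazetteer rest
      (t :: pr.1, pr.2)
    else ([], t :: rest)

theorem pvInner_snd_le (unit_gazetteer : List String) :
    ∀ l : List String, (pvInner unit_gazetteer l).2.length ≤ l.length := by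
  intro l
  induction l with
  | nil => simp [pvInner]
  | cons t rest ih =>
    simp only [pvInner]
    split
    · simpa using Nat.le_succ_of_le ih
    · simp

-- A's outer while, on the remaining suffix of tokens (i = j - 1 then i += 1 ⇒ continue at j)
def pvOuter (unit_gazetteer date_gazetteer time_gazetteer : List String) : List String → List String
  | [] => []
  | t :: rest =>
    if pvIsNum t then
      let pr := pvInner unit_gazetteer rest
      PySem.Str.join " " (t :: pr.1) :: pvOuter unit_gazetteer date_gazetteer time_gazetteer pr.2
    else if date_gazetteer.contains (PySem.Str.lower t) then
      (t ++ " (date)") :: pvOuter unit_gazetteer date_gazetteer time_gazetteer rest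
    else if time_gazetteer.contains (PySem.Str.lower t) then
      (t ++ " (time)") :: pvOuter unit_gazetteer date_gazetteer time_gazetteer rest
    else
      t :: pvOuter unit_gazetteer date_gazetteer time_gazetteer rest
termination_by l => l.length
decreasing_by
  · have := pvInner_snd_le unit_gazetteer rest
    simp only [List.length_cons]
    omega
  all_goals simp

def measured_entity (tokens : List String) (unit_gazetteer : List String) (date_gazetteer : List String) (time_gazetteer : List String) : List String :=
  pvOuter unit_gazetteer date_gazetteer time_gazetteer tokens

-- ===== PORT B =====
-- one loop step; the output list is kept reversed (Python append = cons, out[-1] = head)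
def pvStepB (unit_gazetteer date_gazetteer time_gazetteer : List String)
    (s : List String × Bool) (t : String) : List String × Bool :=
  if s.2 && pvIsUnit unit_gazetteer t then
    (match s.1 with
     | last :: a => (last ++ " " ++ t) :: a
     | [] => [], true)          -- unreachable: in_run implies out nonempty
  else if pvIsNum t then
    (t :: s.1, true)
  else if date_gazetteer.contains (PySem.Str.lower t) then
    ((t ++ " (date)") :: s.1, false)
  else if time_gazetteer.contains (PySem.Str.lower t) then
    ((t ++ " (time)") :: s.1, false)
  else
    (t :: s.1, false)

def measured_entity_alt (tokens : List String) (unit_gazetteer : List String) (date_gazetteer : List String) (time_gazetteer : List String) : List String :=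
  (tokens.foldl (pvStepB unit_gazetteer date_gazetteer time_gazetteer) ([], false)).1.reverse

-- ===== PRECONDITION & SPEC =====
def Spec_measured_entity (tokens : List String) (unit_gazetteer : List String) (date_gazetteer : List String) (time_gazetteer : List String) (out : List String) : Prop := out = measured_entity_alt tokens unit_gazetteer date_gazetteer time_gazetteer
instance (tokens : List String) (unit_gazetteer : List String) (date_gazetteer : List String) (time_gazetteer : List String) (out : List String) : Decidable (Spec_measured_entity tokens unit_gazetteer date_gazetteer time_gazetteer out) := by unfold Spec_measured_entity; infer_instance

-- ===== CLAIM (what is proved, stated in full; the proofs are below) =====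
def Claim_equal_measured_entity : Prop := ∀ (tokens : List String) (unit_gazetteer : List String) (date_gazetteer : List String) (time_gazetteer : List String), Dom_measured_entity tokens unit_gazetteer date_gazetteer time_gazetteer → Spec_measured_entity tokens unit_gazetteer date_gazetteer time_gazetteer (measured_entity tokens unit_gazetteer date_gazetteer time_gazetteer)

-- ===== LEMMAS AND PROOFS =====

theorem pv_chars_foldl_shift (ps : List (List Char)) : ∀ (x y : List Char),
    ps.foldl (fun s z => s ++ [' '] ++ z) (x ++ y) = x ++ ps.foldl (fun s z => s ++ [' '] ++ z) y := by
  induction ps with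
  | nil => intro x y; rfl
  | cons p ps ih =>
    intro x y
    simp only [List.foldl_cons, List.append_assoc]
    simp [ih x (y ++ [' '] ++ p)]

theorem pv_chars_join_eq_foldl : ∀ (ps : List (List Char)) (t : List Char),
    PySem.Chars.join [' '] (t :: ps) = ps.foldl (fun s z => s ++ [' '] ++ z) t := by
  intro ps
  induction ps with
  | nil => intro t; exact PySem.Chars.join_singleton _ _
  | cons p ps ih =>
    intro t
    rw [PySem.Chars.join_cons_cons, ih p, List.foldl_cons]
    rw [show t ++ [' '] ++ p = (t ++ [' ']) ++ p by simp, pv_chars_foldl_shift, List.append_assoc]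

theorem pv_toList_foldl : ∀ (parts : List String) (t : String),
    (parts.foldl (fun s x => s ++ " " ++ x) t).toList
      = (parts.map String.toList).foldl (fun s z => s ++ [' '] ++ z) t.toList := by
  intro parts
  induction parts with
  | nil => intro t; rfl
  | cons p ps ih =>
    intro t
    simp only [List.foldl_cons, List.map_cons, ih, String.toList_append]
    rfl

-- ' '.join(t :: parts) is the left fold appending " " ++ part
theorem pv_join_eq_foldl : ∀ (parts : List String) (t : String),
    PySem.Str.join " " (t :: parts) = parts.foldl (fun s x => s ++ " " ++ x) t := by
  intro parts t
  apply String.toList_inj.mp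
  rw [PySem.Str.toList_join, pv_toList_foldl, List.map_cons]
  have h : (" " : String).toList = [' '] := rfl
  rw [h, pv_chars_join_eq_foldl]

-- while in_run, B merges exactly the tokens A's inner while consumes
theorem pv_foldB_run (ug dg tg : List String) : ∀ (l : List String) (last : String) (a : List String),
    l.foldl (pvStepB ug dg tg) (last :: a, true)
      = (pvInner ug l).2.foldl (pvStepB ug dg tg)
          ((pvInner ug l).1.foldl (fun s x => s ++ " " ++ x) last :: a, true) := by
  intro l
  induction l with
  | nil => intro last a; simp [pvInner]
  | cons t rest ih =>
    intro last a
    by_cases h : pvIsUnit ug t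
    · simp [pvInner, h, List.foldl_cons, pvStepB, ih]
    · simp [pvInner, h, List.foldl_cons]

-- on the token after a run (a non-unit, or none) the flag's value is irrelevant
theorem pv_foldB_flag (ug dg tg : List String) (l : List String) (s : List String)
    (h : l = [] ∨ ∃ t r, l = t :: r ∧ pvIsUnit ug t = false) :
    (l.foldl (pvStepB ug dg tg) (s, true)).1 = (l.foldl (pvStepB ug dg tg) (s, false)).1 := by
  rcases h with h | ⟨t, r, rfl, hu⟩
  · subst h; rfl
  · simp [List.foldl_cons, pvStepB, hu]

theorem pvInner_snd_shape (ug : List String) : ∀ l : List String,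
    (pvInner ug l).2 = [] ∨ ∃ t r, (pvInner ug l).2 = t :: r ∧ pvIsUnit ug t = false := by
  intro l
  induction l with
  | nil => left; rfl
  | cons t rest ih =>
    by_cases h : pvIsUnit ug t
    · simpa [pvInner, h] using ih
    · right; exact ⟨t, rest, by simp [pvInner, h], by simp [h]⟩

-- main invariant: B's fold from a clean state computes A's outer loop (output reversed)
theorem pv_main (ug dg tg : List String) : ∀ (n : Nat) (l : List String), l.length ≤ n →
    ∀ a : List String,
    (l.foldl (pvStepB ug dg tg) (a, false)).1 = (pvOuter ug dg tg l).reverse ++ a := by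
  intro n
  induction n with
  | zero =>
    intro l hl a
    have : l = [] := List.length_eq_zero_iff.mp (Nat.le_zero.mp hl)
    subst this; simp [pvOuter]
  | succ n ih =>
    intro l hl a
    cases l with
    | nil => simp [pvOuter]
    | cons t rest =>
      by_cases hnum : pvIsNum t
      · have hstep : pvStepB ug dg tg (a, false) t = (t :: a, true) := by
          simp [pvStepB, hnum]
        have hrun := pv_foldB_run ug dg tg rest t a
        have hflag := pv_foldB_flag ug dg tg (pvInner ug rest).2
          ((pvInner ug rest).1.foldl (fun s x => s ++ " " ++ x) t :: a)
          (pvInner_snd_shape ug rest)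
        have hlen : (pvInner ug rest).2.length ≤ n := by
          have := pvInner_snd_le ug rest
          simp only [List.length_cons] at hl
          omega
        have hih := ih (pvInner ug rest).2 hlen
          ((pvInner ug rest).1.foldl (fun s x => s ++ " " ++ x) t :: a)
        calc ((t :: rest).foldl (pvStepB ug dg tg) (a, false)).1
            = (rest.foldl (pvStepB ug dg tg) (t :: a, true)).1 := by
              simp [List.foldl_cons, hstep]
          _ = ((pvInner ug rest).2.foldl (pvStepB ug dg tg)
                ((pvInner ug rest).1.foldl (fun s x => s ++ " " ++ x) t :: a, false)).1 := by
              rw [hrun]; exact hflag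
          _ = (pvOuter ug dg tg (pvInner ug rest).2).reverse
                ++ ((pvInner ug rest).1.foldl (fun s x => s ++ " " ++ x) t :: a) := hih
          _ = (pvOuter ug dg tg (t :: rest)).reverse ++ a := by
              simp [pvOuter, hnum, pv_join_eq_foldl]
      · have hlen : rest.length ≤ n := by simp only [List.length_cons] at hl; omega
        by_cases hd : PySem.Str.lower t ∈ dg
        · simp [List.foldl_cons, pvStepB, hnum, hd, pvOuter, ih rest hlen]
        · by_cases ht : PySem.Str.lower t ∈ tg
          · simp [List.foldl_cons, pvStepB, hnum, hd, ht, pvOuter, ih rest hlen]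
          · simp [List.foldl_cons, pvStepB, hnum, hd, ht, pvOuter, ih rest hlen]

-- ===== VERDICT (by name: the statement is the Claim_ definition above) =====
theorem measured_entity_spec : Claim_equal_measured_entity := by
  intro tokens ug dg tg _
  unfold Spec_measured_entity measured_entity measured_entity_alt
  rw [pv_main ug dg tg tokens.length tokens le_rfl []]
  simp
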